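-- pv_equiv track=rewrite | github.com/davido-noowin/SortingAlgorithms | shell_sort3.py | genGap
-- ===== SOURCE A (Python) =====
-- def genGap(size : int) -> list [int]:
--     stack = [1]
--     i = 0
--     j = 0
--     count = 0
--     while (count < size):
--         multiple_of_2 = 2 * stack[i]
--         multiple_of_3 = 3 * stack[j]
--         minimum = min(multiple_of_2, multiple_of_3)
--         stack.append(minimum)
--         if multiple_of_2 <= multiple_of_3:
--             i += 1
--         if multiple_of_2 >= multiple_of_3:
--             j += 1
--
--         count += 1
--
--         if (stack[-1] > size):
--             stack.pop()
--             break
--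
--     return stack
-- ===== SOURCE B (Python) =====
-- def genGap(size: int) -> list[int]:
--     vals = {1}
--     p3 = 1
--     while p3 <= size:
--         p = p3
--         while p <= size:
--             vals.add(p)
--             p *= 2
--         p3 *= 3
--     return sorted(vals)
-- ===== Notes on version B (the rewrite author's own statement) =====
-- stated objective: alternative
-- what changed: Replaces A's two-pointer min-merge generation of the smooth-number stream with direct nested enumeration of all products of powers of two and of three up to size, collected into a set seeded with the unit element and then sorted.
import Mathlib
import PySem

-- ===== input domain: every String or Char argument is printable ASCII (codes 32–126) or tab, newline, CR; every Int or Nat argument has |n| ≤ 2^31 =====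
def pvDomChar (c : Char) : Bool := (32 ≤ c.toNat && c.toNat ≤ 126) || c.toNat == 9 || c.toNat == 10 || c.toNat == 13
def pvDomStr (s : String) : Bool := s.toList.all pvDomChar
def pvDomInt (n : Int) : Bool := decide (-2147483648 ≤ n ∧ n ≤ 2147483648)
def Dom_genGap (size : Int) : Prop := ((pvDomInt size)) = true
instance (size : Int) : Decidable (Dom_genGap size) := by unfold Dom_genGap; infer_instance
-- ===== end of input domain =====

-- B replaces A's two-pointer min-merge of the 3-smooth stream by direct nested enumeration of
-- the values 3^b * 2^a ≤ size into a set (seeded with 1) followed by a sort (objective: alternative).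

-- ===== PORT A =====
-- the while loop of A; indices i, j are always in range on every reachable state (proved via the
-- invariant below), so the pyGetD default 0 is never used.  Python's append-then-pop-on-break is
-- rendered as testing the appended value (min …) before appending — same values, same result.
def genGapLoop (size : Int) (stack : List Int) (i j count : Int) : List Int :=
  if h : count < size then
    let multiple_of_2 := 2 * PySem.List.pyGetD stack i 0
    let multiple_of_3 := 3 * PySem.List.pyGetD stack j 0
    let minimum := min multiple_of_2 multiple_of_3
    if minimum > size then stack
    else genGapLoop size (stack ++ [minimum])
      (if multiple_of_2 ≤ multiple_of_3 then i + 1 else i)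
      (if multiple_of_2 ≥ multiple_of_3 then j + 1 else j)
      (count + 1)
  else stack
termination_by (size - count).toNat
decreasing_by omega

def genGap (size : Int) : List Int := genGapLoop size [1] 0 0 0

-- ===== PORT B =====
-- inner 'while p <= size: vals.add(p); p *= 2' (the 1 ≤ p proof argument only justifies termination)
def genGapInner (size p : Int) (vals : PySem.Set Int) (hp : 1 ≤ p) : PySem.Set Int :=
  if h : p ≤ size then genGapInner size (2 * p) (PySem.Set.add vals p) (by omega) else vals
termination_by (size + 1 - p).toNat
decreasing_by omega

-- outer 'while p3 <= size: <inner loop>; p3 *= 3'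
def genGapOuter (size p3 : Int) (vals : PySem.Set Int) (hp : 1 ≤ p3) : PySem.Set Int :=
  if h : p3 ≤ size then genGapOuter size (3 * p3) (genGapInner size p3 vals hp) (by omega) else vals
termination_by (size + 1 - p3).toNat
decreasing_by omega

def genGap_alt (size : Int) : List Int :=
  PySem.List.sorted (genGapOuter size 1 (PySem.Set.ofList [1]) (by norm_num)) (fun x => x) false

-- ===== PRECONDITION & SPEC =====
def Spec_genGap (size : Int) (out : List Int) : Prop := out = genGap_alt size
instance (size : Int) (out : List Int) : Decidable (Spec_genGap size out) := by unfold Spec_genGap; infer_instance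

-- ===== CLAIM (what is proved, stated in full; the proofs are below) =====
def Claim_equal_genGap : Prop := ∀ (size : Int), Dom_genGap size → Spec_genGap size (genGap size)

-- ===== LEMMAS AND PROOFS =====

-- a 3-smooth number
def Smooth (n : Int) : Prop := ∃ a b : ℕ, n = 2 ^ a * 3 ^ b

theorem smooth_one_le {n : Int} (h : Smooth n) : 1 ≤ n := by
  obtain ⟨a, b, rfl⟩ := h
  have h2 : (1 : Int) ≤ 2 ^ a := one_le_pow₀ (by norm_num)
  have h3 : (1 : Int) ≤ 3 ^ b := one_le_pow₀ (by norm_num)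
  nlinarith

theorem smooth_one : Smooth 1 := ⟨0, 0, rfl⟩

theorem smooth_two_mul {n : Int} (h : Smooth n) : Smooth (2 * n) := by
  obtain ⟨a, b, rfl⟩ := h; exact ⟨a + 1, b, by ring⟩

theorem smooth_three_mul {n : Int} (h : Smooth n) : Smooth (3 * n) := by
  obtain ⟨a, b, rfl⟩ := h; exact ⟨a, b + 1, by ring⟩

-- every smooth number > 1 is twice or three times a smaller smooth number
theorem smooth_decomp {n : Int} (h : Smooth n) (h1 : 1 < n) :
    (∃ m, Smooth m ∧ n = 2 * m) ∨ (∃ m, Smooth m ∧ n = 3 * m) := by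
  obtain ⟨a, b, rfl⟩ := h
  cases a with
  | succ a => exact Or.inl ⟨2 ^ a * 3 ^ b, ⟨a, b, rfl⟩, by ring⟩
  | zero =>
    cases b with
    | succ b => exact Or.inr ⟨2 ^ 0 * 3 ^ b, ⟨0, b, rfl⟩, by ring⟩
    | zero => simp at h1

-- invariant of A's loop: stack is exactly the sorted list of smooth numbers ≤ L (its last element),
-- i is the least index with 2*stack[i] > L, j the least with 3*stack[j] > L
def InvA (stack : List Int) (iN jN : ℕ) (L : Int) : Prop :=
  stack.Pairwise (· < ·) ∧
  (∀ n : Int, n ∈ stack ↔ Smooth n ∧ n ≤ L) ∧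
  L ∈ stack ∧
  iN < stack.length ∧ jN < stack.length ∧
  L < 2 * stack.getD iN 0 ∧ (∀ t, t < iN → 2 * stack.getD t 0 ≤ L) ∧
  L < 3 * stack.getD jN 0 ∧ (∀ t, t < jN → 3 * stack.getD t 0 ≤ L)

theorem getD_mem {l : List Int} {t : ℕ} (ht : t < l.length) : l.getD t 0 ∈ l := by
  rw [List.getD_eq_getElem l 0 ht]; exact List.getElem_mem ht

theorem getD_mono {l : List Int} (hp : l.Pairwise (· < ·)) {p q : ℕ}
    (hpq : p ≤ q) (hq : q < l.length) : l.getD p 0 ≤ l.getD q 0 := by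
  rcases Nat.lt_or_ge p q with h | h
  · rw [List.getD_eq_getElem l 0 (Nat.lt_trans h hq), List.getD_eq_getElem l 0 hq]
    exact le_of_lt (List.pairwise_iff_getElem.mp hp _ _ _ _ h)
  · have : p = q := le_antisymm hpq h
    subst this; exact le_refl _

-- min(2*stack[i], 3*stack[j]) is ≤ every smooth number exceeding L
theorem getD_strict {l : List Int} (hp : l.Pairwise (· < ·)) {p q : ℕ}
    (hpq : p < q) (hq : q < l.length) : l.getD p 0 < l.getD q 0 := by
  rw [List.getD_eq_getElem l 0 (Nat.lt_trans hpq hq), List.getD_eq_getElem l 0 hq]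
  exact List.pairwise_iff_getElem.mp hp _ _ _ _ hpq

theorem least_smooth {stack : List Int} {iN jN : ℕ} {L : Int} (hInv : InvA stack iN jN L) :
    ∀ m : Int, Smooth m → L < m →
      min (2 * stack.getD iN 0) (3 * stack.getD jN 0) ≤ m := by
  intro m hm hLm
  obtain ⟨hpw, hchar, hLmem, hi, hj, h2i, h2lt, h3j, h3lt⟩ := hInv
  have hL1 : 1 ≤ L := smooth_one_le ((hchar L).mp hLmem).1
  have hm1 : 1 < m := lt_of_le_of_lt hL1 hLm
  have hmin2 := min_le_left (2 * stack.getD iN 0) (3 * stack.getD jN 0)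
  have hmin3 := min_le_right (2 * stack.getD iN 0) (3 * stack.getD jN 0)
  rcases smooth_decomp hm hm1 with ⟨m', hm', rfl⟩ | ⟨m', hm', rfl⟩
  · by_cases hle : m' ≤ L
    · have hmem : m' ∈ stack := (hchar m').mpr ⟨hm', hle⟩
      obtain ⟨t, ht, he⟩ := List.mem_iff_getElem.mp hmem
      have he' : stack.getD t 0 = m' := by rw [List.getD_eq_getElem _ _ ht]; exact he
      rcases Nat.lt_or_ge t iN with htl | htg
      · exfalso; have := h2lt t htl; omega
      · have hmono := getD_mono hpw htg ht
        linarith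
    · push_neg at hle
      have hiL : stack.getD iN 0 ≤ L := ((hchar _).mp (getD_mem hi)).2
      linarith
  · by_cases hle : m' ≤ L
    · have hmem : m' ∈ stack := (hchar m').mpr ⟨hm', hle⟩
      obtain ⟨t, ht, he⟩ := List.mem_iff_getElem.mp hmem
      have he' : stack.getD t 0 = m' := by rw [List.getD_eq_getElem _ _ ht]; exact he
      rcases Nat.lt_or_ge t jN with htl | htg
      · exfalso; have := h3lt t htl; omega
      · have hmono := getD_mono hpw htg ht
        linarith
    · push_neg at hle
      have hjL : stack.getD jN 0 ≤ L := ((hchar _).mp (getD_mem hj)).2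
      linarith

-- the invariant is preserved by one loop step
theorem inv_step {stack : List Int} {iN jN : ℕ} {L : Int} (hInv : InvA stack iN jN L) :
    InvA (stack ++ [min (2 * stack.getD iN 0) (3 * stack.getD jN 0)])
      (if 2 * stack.getD iN 0 ≤ 3 * stack.getD jN 0 then iN + 1 else iN)
      (if 2 * stack.getD iN 0 ≥ 3 * stack.getD jN 0 then jN + 1 else jN)
      (min (2 * stack.getD iN 0) (3 * stack.getD jN 0)) := by
  have hleast := least_smooth hInv
  obtain ⟨hpw, hchar, hLmem, hi, hj, h2i, h2lt, h3j, h3lt⟩ := hInv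
  set si := stack.getD iN 0 with hsi
  set sj := stack.getD jN 0 with hsj
  set mn := min (2 * si) (3 * sj) with hmn
  have hL1 : 1 ≤ L := smooth_one_le ((hchar L).mp hLmem).1
  have hLmn : L < mn := lt_min h2i h3j
  have hsmn : Smooth mn := by
    rcases le_total (2 * si) (3 * sj) with h | h
    · rw [hmn, min_eq_left h]; exact smooth_two_mul ((hchar si).mp (getD_mem hi)).1
    · rw [hmn, min_eq_right h]; exact smooth_three_mul ((hchar sj).mp (getD_mem hj)).1
  have hub : ∀ n ∈ stack, n ≤ L := fun n hn => ((hchar n).mp hn).2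
  have hchar' : ∀ n : Int, n ∈ stack ++ [mn] ↔ Smooth n ∧ n ≤ mn := by
    intro n
    simp only [List.mem_append, List.mem_singleton]
    constructor
    · rintro (hn | rfl)
      · exact ⟨((hchar n).mp hn).1, le_trans (hub n hn) (le_of_lt hLmn)⟩
      · exact ⟨hsmn, le_refl _⟩
    · rintro ⟨hsn, hle⟩
      by_cases h : n ≤ L
      · exact Or.inl ((hchar n).mpr ⟨hsn, h⟩)
      · push_neg at h
        have := hleast n hsn h
        right; omega
  have hpw' : (stack ++ [mn]).Pairwise (· < ·) := by
    rw [List.pairwise_append]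
    refine ⟨hpw, List.pairwise_singleton _ _, ?_⟩
    intro a ha b hb
    simp only [List.mem_singleton] at hb
    subst hb
    exact lt_of_le_of_lt (hub a ha) hLmn
  have hD : ∀ t, t < stack.length → (stack ++ [mn]).getD t 0 = stack.getD t 0 := by
    intro t ht
    rw [List.getD_eq_getElem _ 0 (by simp only [List.length_append, List.length_cons, List.length_nil]; omega),
      List.getElem_append_left ht, List.getD_eq_getElem _ 0 ht]
  have hDlast : (stack ++ [mn]).getD stack.length 0 = mn := by
    rw [List.getD_eq_getElem _ 0 (by simp)]
    simp
  have hlen' : (stack ++ [mn]).length = stack.length + 1 := by simp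
  refine ⟨hpw', hchar', (hchar' mn).mpr ⟨hsmn, le_refl _⟩, ?_, ?_, ?_, ?_, ?_, ?_⟩
  · split <;> omega
  · split <;> omega
  · -- mn < 2 * (stack ++ [mn]).getD i' 0
    by_cases hc : 2 * si ≤ 3 * sj
    · rw [if_pos hc]
      have hmneq : mn = 2 * si := min_eq_left hc
      rcases Nat.lt_or_ge (iN + 1) stack.length with hlt | hge
      · rw [hD _ hlt]
        have := getD_strict hpw (by omega : iN < iN + 1) hlt
        omega
      · have : iN + 1 = stack.length := by omega
        rw [this, hDlast]
        omega
    · rw [if_neg hc]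
      rw [hD _ hi]
      have hmneq : mn = 3 * sj := min_eq_right (by omega)
      omega
  · -- ∀ t < i', 2 * getD t ≤ mn
    intro t htl
    by_cases hc : 2 * si ≤ 3 * sj
    · rw [if_pos hc] at htl
      have hmneq : mn = 2 * si := min_eq_left hc
      rcases Nat.lt_or_ge t iN with h | h
      · rw [hD _ (Nat.lt_trans h hi)]
        have := h2lt t h
        omega
      · have : t = iN := by omega
        subst this
        rw [hD _ hi]
        omega
    · rw [if_neg hc] at htl
      rw [hD _ (Nat.lt_trans htl hi)]
      have := h2lt t htl
      omega
  · -- mn < 3 * (stack ++ [mn]).getD j' 0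
    by_cases hc : 2 * si ≥ 3 * sj
    · rw [if_pos hc]
      have hmneq : mn = 3 * sj := min_eq_right hc
      rcases Nat.lt_or_ge (jN + 1) stack.length with hlt | hge
      · rw [hD _ hlt]
        have := getD_strict hpw (by omega : jN < jN + 1) hlt
        omega
      · have : jN + 1 = stack.length := by omega
        rw [this, hDlast]
        omega
    · rw [if_neg hc]
      rw [hD _ hj]
      have hmneq : mn = 2 * si := min_eq_left (by omega)
      omega
  · -- ∀ t < j', 3 * getD t ≤ mn
    intro t htl
    by_cases hc : 2 * si ≥ 3 * sj
    · rw [if_pos hc] at htl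
      have hmneq : mn = 3 * sj := min_eq_right hc
      rcases Nat.lt_or_ge t jN with h | h
      · rw [hD _ (Nat.lt_trans h hj)]
        have := h3lt t h
        omega
      · have : t = jN := by omega
        subst this
        rw [hD _ hj]
        omega
    · rw [if_neg hc] at htl
      rw [hD _ (Nat.lt_trans htl hj)]
      have := h3lt t htl
      omega

-- a strictly increasing integer list inside [lo, hi] has at most hi - lo + 1 elements
theorem len_le_of_pairwise {l : List Int} {hi : Int} (hp : l.Pairwise (· < ·))
    (hub : ∀ n ∈ l, n ≤ hi) : ∀ lo : Int, (∀ n ∈ l, lo ≤ n) → (l.length : Int) ≤ hi - lo + 1 ∨ l = [] := by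
  induction l with
  | nil => exact fun lo _ => Or.inr rfl
  | cons a t ih =>
    intro lo hlb
    have hat : ∀ n ∈ t, a < n := (List.pairwise_cons.mp hp).1
    rcases ih (List.Pairwise.of_cons hp) (fun n hn => hub n (List.mem_cons_of_mem a hn))
        (a + 1) (fun n hn => hat n hn) with h | h
    · left; simp only [List.length_cons]; push_cast
      have := hlb a (List.mem_cons_self)
      omega
    · left; subst h
      have h1 := hlb a (List.mem_cons_self)
      have h2 := hub a (List.mem_cons_self)
      simp only [List.length_cons, List.length_nil]
      omega

-- the count-limit of A's while loop never binds: a strictly increasing list of smooth numbers ≤ L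
-- of length count+1 forces count < L ≤ size
theorem count_lt {size L : Int} {stack : List Int} {iN jN cN : ℕ}
    (hInv : InvA stack iN jN L) (hLs : L ≤ size) (hlen : stack.length = cN + 1) :
    (cN : Int) < size := by
  obtain ⟨hpw, hchar, hLmem, _⟩ := hInv
  have hub : ∀ n ∈ stack, n ≤ L := fun n hn => ((hchar n).mp hn).2
  have hlb : ∀ n ∈ stack, (1:Int) ≤ n := fun n hn => smooth_one_le ((hchar n).mp hn).1
  rcases len_le_of_pairwise hpw hub 1 hlb with h | h
  · rw [hlen] at h; push_cast at h; omega
  · rw [h] at hlen; simp at hlen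

-- full characterisation of A's loop result
theorem loopA_char (size : Int) :
    ∀ (k : ℕ) (stack : List Int) (iN jN cN : ℕ) (L : Int),
      (size - cN).toNat ≤ k →
      InvA stack iN jN L → L ≤ size → stack.length = cN + 1 →
      ((genGapLoop size stack iN jN cN).Pairwise (· < ·) ∧
        ∀ n, n ∈ genGapLoop size stack (iN : Int) (jN : Int) (cN : Int) ↔ Smooth n ∧ n ≤ size) := by
  intro k
  induction k with
  | zero =>
    intro stack iN jN cN L hk hInv hLs hlen
    have := count_lt hInv hLs hlen
    omega
  | succ k ih =>
    intro stack iN jN cN L hk hInv hLs hlen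
    have hcount : (cN : Int) < size := count_lt hInv hLs hlen
    rw [genGapLoop.eq_def, dif_pos hcount]
    simp only [PySem.List.pyGetD_natCast]
    by_cases hbig : min (2 * stack.getD iN 0) (3 * stack.getD jN 0) > size
    · rw [if_pos hbig]
      refine ⟨hInv.1, fun n => ⟨fun hn => ⟨((hInv.2.1 n).mp hn).1,
        le_trans ((hInv.2.1 n).mp hn).2 hLs⟩, ?_⟩⟩
      rintro ⟨hsn, hns⟩
      by_cases hnL : n ≤ L
      · exact (hInv.2.1 n).mpr ⟨hsn, hnL⟩
      · exfalso
        have := least_smooth hInv n hsn (by omega)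
        linarith
    · rw [if_neg hbig]
      have e1 : (if 2 * stack.getD iN 0 ≤ 3 * stack.getD jN 0 then (iN : Int) + 1 else (iN : Int)) =
          (((if 2 * stack.getD iN 0 ≤ 3 * stack.getD jN 0 then iN + 1 else iN : ℕ)) : Int) := by
        split <;> push_cast <;> ring
      have e2 : (if 2 * stack.getD iN 0 ≥ 3 * stack.getD jN 0 then (jN : Int) + 1 else (jN : Int)) =
          (((if 2 * stack.getD iN 0 ≥ 3 * stack.getD jN 0 then jN + 1 else jN : ℕ)) : Int) := by
        split <;> push_cast <;> ring
      have e3 : (cN : Int) + 1 = ((cN + 1 : ℕ) : Int) := by push_cast; ring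
      rw [e1, e2, e3]
      exact ih (stack ++ [min (2 * stack.getD iN 0) (3 * stack.getD jN 0)]) _ _ (cN + 1)
        (min (2 * stack.getD iN 0) (3 * stack.getD jN 0)) (by omega) (inv_step hInv)
        (not_lt.mp hbig) (by simp [hlen])

theorem genGap_char (size : Int) (hs : 1 ≤ size) :
    (genGap size).Pairwise (· < ·) ∧ ∀ n, n ∈ genGap size ↔ Smooth n ∧ n ≤ size := by
  have hInv : InvA [1] 0 0 1 := by
    refine ⟨by simp, ?_, by simp, by simp, by simp, by decide, ?_, by decide, ?_⟩
    · intro n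
      simp only [List.mem_singleton]
      constructor
      · rintro rfl; exact ⟨smooth_one, le_refl _⟩
      · rintro ⟨hsn, hle⟩
        have := smooth_one_le hsn
        omega
    · intro t ht; omega
    · intro t ht; omega
  have h := loopA_char size size.toNat [1] 0 0 0 1 (by omega) hInv hs rfl
  unfold genGap
  simpa using h

-- B-side: characterisation of the inner loop
-- inner loop when it does not run
theorem innerB_stop (size p : Int) (vals : PySem.Set Int) (hp : 1 ≤ p) (hps : ¬ p ≤ size) :
    (∀ n, n ∈ genGapInner size p vals hp ↔ n ∈ vals ∨ ∃ t : ℕ, n = p * 2 ^ t ∧ n ≤ size) ∧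
      (vals.Nodup → (genGapInner size p vals hp).Nodup) := by
  rw [genGapInner.eq_def, dif_neg hps]
  refine ⟨fun n => ⟨Or.inl, ?_⟩, fun h => h⟩
  rintro (h | ⟨t, rfl, hle⟩)
  · exact h
  · exfalso
    have h2 : (1:Int) ≤ 2 ^ t := one_le_pow₀ (by norm_num)
    nlinarith

theorem innerB_char (size : Int) :
    ∀ (k : ℕ) (p : Int) (vals : PySem.Set Int) (hp : 1 ≤ p),
      (size + 1 - p).toNat ≤ k →
      ((∀ n, n ∈ genGapInner size p vals hp ↔ n ∈ vals ∨ ∃ t : ℕ, n = p * 2 ^ t ∧ n ≤ size) ∧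
        (vals.Nodup → (genGapInner size p vals hp).Nodup)) := by
  intro k
  induction k with
  | zero =>
    intro p vals hp hk
    exact innerB_stop size p vals hp (by omega)
  | succ k ih =>
    intro p vals hp hk
    by_cases hps : p ≤ size
    · rw [genGapInner.eq_def, dif_pos hps]
      obtain ⟨hmem, hnd⟩ := ih (2 * p) (PySem.Set.add vals p) (by omega) (by omega)
      constructor
      · intro n
        rw [hmem n, PySem.Set.mem_add vals p n]
        constructor
        · rintro ((h | rfl) | ⟨t, rfl, hle⟩)
          · exact Or.inl h
          · exact Or.inr ⟨0, by ring, hps⟩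
          · exact Or.inr ⟨t + 1, by ring, hle⟩
        · rintro (h | ⟨t, rfl, hle⟩)
          · exact Or.inl (Or.inl h)
          · cases t with
            | zero => exact Or.inl (Or.inr (by ring))
            | succ t => exact Or.inr ⟨t, by ring, by nlinarith [hle]⟩
      · intro h0
        exact hnd (PySem.Set.nodup_add vals p h0)
    · exact innerB_stop size p vals hp hps

-- outer loop when it does not run
theorem outerB_stop (size p3 : Int) (vals : PySem.Set Int) (hp : 1 ≤ p3) (hps : ¬ p3 ≤ size) :
    (∀ n, n ∈ genGapOuter size p3 vals hp ↔ n ∈ vals ∨ ∃ b t : ℕ, n = p3 * 3 ^ b * 2 ^ t ∧ n ≤ size) ∧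
      (vals.Nodup → (genGapOuter size p3 vals hp).Nodup) := by
  rw [genGapOuter.eq_def, dif_neg hps]
  refine ⟨fun n => ⟨Or.inl, ?_⟩, fun h => h⟩
  rintro (h | ⟨b, t, rfl, hle⟩)
  · exact h
  · exfalso
    have h2 : (1:Int) ≤ 2 ^ t := one_le_pow₀ (by norm_num)
    have h3 : (1:Int) ≤ 3 ^ b := one_le_pow₀ (by norm_num)
    have h4 : p3 ≤ p3 * 3 ^ b := le_mul_of_one_le_right (by omega) h3
    have h5 : p3 * 3 ^ b ≤ p3 * 3 ^ b * 2 ^ t := le_mul_of_one_le_right (by linarith) h2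
    linarith

theorem outerB_char (size : Int) :
    ∀ (k : ℕ) (p3 : Int) (vals : PySem.Set Int) (hp : 1 ≤ p3),
      (size + 1 - p3).toNat ≤ k →
      ((∀ n, n ∈ genGapOuter size p3 vals hp ↔ n ∈ vals ∨ ∃ b t : ℕ, n = p3 * 3 ^ b * 2 ^ t ∧ n ≤ size) ∧
        (vals.Nodup → (genGapOuter size p3 vals hp).Nodup)) := by
  intro k
  induction k with
  | zero =>
    intro p3 vals hp hk
    exact outerB_stop size p3 vals hp (by omega)
  | succ k ih =>
    intro p3 vals hp hk
    by_cases hps : p3 ≤ size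
    · rw [genGapOuter.eq_def, dif_pos hps]
      obtain ⟨imem, ind⟩ := innerB_char size ((size + 1 - p3).toNat) p3 vals hp le_rfl
      obtain ⟨omem, ond⟩ := ih (3 * p3) (genGapInner size p3 vals hp) (by omega) (by omega)
      constructor
      · intro n
        rw [omem n]
        constructor
        · rintro (h | ⟨b, t, rfl, hle⟩)
          · rcases (imem n).mp h with h' | ⟨t, rfl, hle⟩
            · exact Or.inl h'
            · exact Or.inr ⟨0, t, by ring, hle⟩
          · exact Or.inr ⟨b + 1, t, by ring, hle⟩
        · rintro (h | ⟨b, t, rfl, hle⟩)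
          · exact Or.inl ((imem n).mpr (Or.inl h))
          · cases b with
            | zero => exact Or.inl ((imem _).mpr (Or.inr ⟨t, by ring, hle⟩))
            | succ b => exact Or.inr ⟨b, t, by ring, hle⟩
      · intro h0
        exact ond (ind h0)
    · exact outerB_stop size p3 vals hp hps

theorem altB_char (size : Int) :
    (∀ n, n ∈ genGapOuter size 1 (PySem.Set.ofList [1]) (by norm_num) ↔ n = 1 ∨ (Smooth n ∧ n ≤ size)) ∧
      (genGapOuter size 1 (PySem.Set.ofList [1]) (by norm_num)).Nodup := by
  obtain ⟨omem, ond⟩ := outerB_char size size.toNat 1 (PySem.Set.ofList [1]) (by norm_num) (by omega)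
  constructor
  · intro n
    rw [omem n, PySem.Set.mem_ofList]
    simp only [List.mem_singleton]
    constructor
    · rintro (h | ⟨b, t, rfl, hle⟩)
      · exact Or.inl h
      · exact Or.inr ⟨⟨t, b, by ring⟩, hle⟩
    · rintro (rfl | ⟨⟨a, b, rfl⟩, hle⟩)
      · exact Or.inl rfl
      · exact Or.inr ⟨b, a, by ring, hle⟩
  · exact ond (PySem.Set.nodup_ofList [1])

theorem genGap_eq_alt (size : Int) : genGap size = genGap_alt size := by
  by_cases hs : 1 ≤ size
  · obtain ⟨hpw, hchar⟩ := genGap_char size hs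
    obtain ⟨hmem, hnd⟩ := altB_char size
    unfold genGap_alt
    refine (PySem.List.sorted_eq_of_perm_of_pairwise_lt _ _ (fun x => x) ?_ ?_).symm
    · rw [List.perm_ext_iff_of_nodup (hpw.imp fun h => ne_of_lt h) hnd]
      intro n
      rw [hchar n, hmem n]
      constructor
      · exact fun h => Or.inr h
      · rintro (rfl | h)
        · exact ⟨smooth_one, hs⟩
        · exact h
    · exact hpw
  · unfold genGap genGap_alt
    rw [genGapLoop.eq_def, dif_neg (by omega : ¬ (0:Int) < size)]
    rw [genGapOuter.eq_def, dif_neg (by omega : ¬ (1:Int) ≤ size)]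
    decide

-- ===== VERDICT (by name: the statement is the Claim_ definition above) =====
theorem genGap_spec : Claim_equal_genGap := by
  intro size _
  unfold Spec_genGap
  exact genGap_eq_alt size
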